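-- pv_equiv track=rewrite | github.com/Wasabules/SnmpLens | tools/snmp_test_agent.py | decode_integer
-- ===== SOURCE A (Python) =====
-- def decode_integer(data):
--     value = 0
--     negative = data[0] & 0x80 if data else False
--     for b in data:
--         value = (value << 8) | b
--     if negative:
--         value -= (1 << (len(data) * 8))
--     return value
-- ===== SOURCE B (Python) =====
-- def decode_integer(data):
--     # Divide and conquer: decode each half recursively, join with one shift+OR.
--     def unsigned(chunk):
--         n = len(chunk)
--         if n <= 1:
--             return chunk[0] if chunk else 0
--         mid = n // 2
--         return (unsigned(chunk[:mid]) << (8 * (n - mid))) | unsigned(chunk[mid:])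
--     value = unsigned(data)
--     if data and data[0] & 0x80:
--         value -= 1 << (8 * len(data))
--     return value
-- ===== Notes on version B (the rewrite author's own statement) =====
-- stated objective: alternative
-- what changed: B decodes by divide-and-conquer: it recursively decodes the two halves of the byte list and joins them with a single shift+OR, instead of A's linear left-to-right shift-accumulate loop; the sign correction is unchanged.
import Mathlib
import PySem

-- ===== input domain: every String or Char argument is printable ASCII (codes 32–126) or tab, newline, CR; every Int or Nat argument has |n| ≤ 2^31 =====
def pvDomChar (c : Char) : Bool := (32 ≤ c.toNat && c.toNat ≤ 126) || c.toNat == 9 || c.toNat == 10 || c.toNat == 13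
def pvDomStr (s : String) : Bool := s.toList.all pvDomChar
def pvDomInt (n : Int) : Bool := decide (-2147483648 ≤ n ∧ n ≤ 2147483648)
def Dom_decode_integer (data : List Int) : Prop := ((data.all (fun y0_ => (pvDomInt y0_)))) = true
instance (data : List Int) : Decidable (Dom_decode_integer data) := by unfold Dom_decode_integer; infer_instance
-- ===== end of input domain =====

-- B decodes by divide-and-conquer (recursively decode each half, join with one shift+OR)
-- instead of A's linear shift-accumulate loop; both are total, return values agree everywhere.

-- ===== PORT A =====
-- negative = data[0] & 0x80 if data else False : an Int (0 plays Python's False — both are falsy)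
def decode_integer (data : List Int) : Int :=
  let negative : Int := match data with
    | [] => 0
    | b :: _ => PySem.Int.band b 128
  let value : Int := data.foldl (fun v b => PySem.Int.bor (v <<< (8 : Nat)) b) 0
  if negative ≠ 0 then value - ((1 : Int) <<< (data.length * 8)) else value

-- ===== PORT B =====
-- unsigned(chunk): n <= 1 base case, else split at n // 2 and join halves with shift+OR
def pvUnsignedB (xs : List Int) : Int :=
  if xs.length ≤ 1 then
    match xs with
    | [] => 0
    | b :: _ => b
  else
    let mid := xs.length / 2
    PySem.Int.bor ((pvUnsignedB (xs.take mid)) <<< (8 * (xs.length - mid)))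
                  (pvUnsignedB (xs.drop mid))
termination_by xs.length
decreasing_by
  · simp only [List.length_take]; omega
  · simp only [List.length_drop]; omega

def decode_integer_alt (data : List Int) : Int :=
  let value : Int := pvUnsignedB data
  match data with
  | [] => value
  | b :: _ =>
    if PySem.Int.band b 128 ≠ 0 then value - ((1 : Int) <<< (8 * data.length)) else value

-- ===== PRECONDITION & SPEC =====
def Spec_decode_integer (data : List Int) (out : Int) : Prop := out = decode_integer_alt data
instance (data : List Int) (out : Int) : Decidable (Spec_decode_integer data out) := by unfold Spec_decode_integer; infer_instance

-- ===== CLAIM (what is proved, stated in full; the proofs are below) =====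
def Claim_equal_decode_integer : Prop := ∀ (data : List Int), Dom_decode_integer data → Spec_decode_integer data (decode_integer data)

-- ===== LEMMAS AND PROOFS =====

-- Nat bit helpers ------------------------------------------------------------

lemma pv_ldiff_div_two (n m : ℕ) : (Nat.ldiff n m) / 2 = Nat.ldiff (n / 2) (m / 2) := by
  apply Nat.eq_of_testBit_eq; intro i
  simp [Nat.testBit_div_two, Nat.testBit_ldiff]

lemma pv_ldiff_zero_left (m : ℕ) : Nat.ldiff 0 m = 0 := by
  apply Nat.eq_of_testBit_eq; intro i
  simp [Nat.testBit_ldiff]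

lemma pv_mod_two_of_testBit (x : ℕ) : x % 2 = if x.testBit 0 then 1 else 0 := by
  rcases Nat.mod_two_eq_zero_or_one x with h | h <;> simp [Nat.testBit_zero, h]

lemma pv_and_add_ldiff : ∀ n m : ℕ, (n &&& m) + Nat.ldiff n m = n := by
  intro n
  induction n using Nat.strong_induction_on with
  | _ n ih =>
    intro m
    rcases Nat.eq_zero_or_pos n with rfl | hn
    · simp [pv_ldiff_zero_left]
    · have hlt : n / 2 < n := Nat.div_lt_self hn (by norm_num)
      have hIH := ih (n / 2) hlt (m / 2)
      have hA : (n &&& m) / 2 = n / 2 &&& m / 2 := Nat.and_div_two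
      have hL : (Nat.ldiff n m) / 2 = Nat.ldiff (n / 2) (m / 2) := pv_ldiff_div_two n m
      have hAm : (n &&& m) % 2 = if (n.testBit 0 && m.testBit 0) then 1 else 0 := by
        rw [pv_mod_two_of_testBit, Nat.testBit_and]
      have hLm : (Nat.ldiff n m) % 2 = if (n.testBit 0 && !m.testBit 0) then 1 else 0 := by
        rw [pv_mod_two_of_testBit, Nat.testBit_ldiff]
      have hNm : n % 2 = if n.testBit 0 then 1 else 0 := pv_mod_two_of_testBit n
      have e1 : n &&& m = 2 * ((n &&& m) / 2) + (n &&& m) % 2 := (Nat.div_add_mod _ 2).symm.trans (by ring)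
      have e2 : Nat.ldiff n m = 2 * ((Nat.ldiff n m) / 2) + (Nat.ldiff n m) % 2 := (Nat.div_add_mod _ 2).symm.trans (by ring)
      have e3 : n = 2 * (n / 2) + n % 2 := (Nat.div_add_mod _ 2).symm.trans (by ring)
      rw [hNm] at e3
      rw [e1, e2, hA, hL, hAm, hLm]
      cases hb : n.testBit 0 <;> cases hc : m.testBit 0 <;>
        simp <;> simp [hb] at e3 <;> omega

lemma pv_sub_and_eq_ldiff (n m : ℕ) : n - (n &&& m) = Nat.ldiff n m := by
  have := pv_and_add_ldiff n m; omega

-- bor = Int.lor, and its algebra ---------------------------------------------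

lemma pv_bor_eq_lor (a b : Int) : PySem.Int.bor a b = Int.lor a b := by
  unfold PySem.Int.bor Int.lor
  have hneg : ∀ k : ℕ, ¬ ((k : ℤ) ≤ -1) := by intro k; omega
  rcases a with m | m <;> rcases b with n | n <;>
    simp [Int.toNat, pv_sub_and_eq_ldiff, Int.negSucc_eq, hneg] <;> ring

lemma pv_lor_assoc (a b c : Int) : Int.lor (Int.lor a b) c = Int.lor a (Int.lor b c) := by
  rcases a with m | m <;> rcases b with n | n <;> rcases c with k | k <;>
    simp only [Int.lor] <;> congr 1 <;> apply Nat.eq_of_testBit_eq <;> intro i <;>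
    simp only [Nat.testBit_or, Nat.testBit_and, Nat.testBit_ldiff] <;>
    cases m.testBit i <;> cases n.testBit i <;> cases k.testBit i <;> rfl

lemma pv_bor_assoc (a b c : Int) :
    PySem.Int.bor (PySem.Int.bor a b) c = PySem.Int.bor a (PySem.Int.bor b c) := by
  simp only [pv_bor_eq_lor]; exact pv_lor_assoc a b c

lemma pv_zero_bor (a : Int) : PySem.Int.bor 0 a = a := by
  rw [PySem.Int.bor_comm, PySem.Int.bor_zero]

-- shifts ----------------------------------------------------------------------

lemma pv_shl_eq (a : ℤ) (k : ℕ) : a <<< k = a * 2 ^ k := by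
  rw [← Int.shiftLeft_natCast_right, Int.shiftLeft_eq_mul_pow]; push_cast; ring

lemma pv_nat_testBit_mul_pow (m k j : ℕ) :
    (m * 2 ^ k).testBit j = if j < k then false else m.testBit (j - k) := by
  rw [mul_comm, ← Nat.add_zero (2 ^ k * m),
    Nat.testBit_two_pow_mul_add m (Nat.two_pow_pos k) j]
  simp

lemma pv_nat_testBit_mul_pow_add (m k j : ℕ) :
    (m * 2 ^ k + (2 ^ k - 1)).testBit j = if j < k then true else m.testBit (j - k) := by
  rw [mul_comm, Nat.testBit_two_pow_mul_add m (Nat.sub_lt (Nat.two_pow_pos k) one_pos) j]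
  simp [Nat.testBit_two_pow_sub_one]

lemma pv_natN1 (m n k : ℕ) : (m * 2 ^ k) ||| (n * 2 ^ k) = (m ||| n) * 2 ^ k := by
  apply Nat.eq_of_testBit_eq; intro i
  simp only [Nat.testBit_or, pv_nat_testBit_mul_pow]
  split_ifs <;> simp

lemma pv_natN2 (m x k : ℕ) : (m * 2 ^ k + (2 ^ k - 1)) &&& (x * 2 ^ k) = (m &&& x) * 2 ^ k := by
  apply Nat.eq_of_testBit_eq; intro i
  simp only [Nat.testBit_and, pv_nat_testBit_mul_pow, pv_nat_testBit_mul_pow_add]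
  split_ifs <;> simp

lemma pv_natN3 (m n k : ℕ) :
    (m * 2 ^ k + (2 ^ k - 1)) &&& (n * 2 ^ k + (2 ^ k - 1)) = (m &&& n) * 2 ^ k + (2 ^ k - 1) := by
  apply Nat.eq_of_testBit_eq; intro i
  simp only [Nat.testBit_and, pv_nat_testBit_mul_pow_add]
  split_ifs <;> simp

lemma pv_neg_prod_toNat (n PN : ℕ) (h1 : 1 ≤ PN) :
    (-(-((n : ℤ) + 1) * (PN : ℤ)) - 1).toNat = n * PN + (PN - 1) := by
  have : (-(-((n : ℤ) + 1) * (PN : ℤ)) - 1) = ↑(n * PN + (PN - 1)) := by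
    push_cast [Nat.cast_sub h1]; ring
  rw [this, Int.toNat_natCast]

lemma pv_neg_self_toNat (n : ℕ) : (-(-((n : ℤ) + 1)) - 1).toNat = n := by
  have : (-(-((n : ℤ) + 1)) - 1) = ↑n := by ring
  rw [this, Int.toNat_natCast]

lemma pv_cast_mul_pow_toNat (m PN : ℕ) : ((m : ℤ) * (PN : ℤ)).toNat = m * PN := by
  rw [show ((m : ℤ) * (PN : ℤ)) = ↑(m * PN) by push_cast; ring, Int.toNat_natCast]

lemma pv_bor_mul_pow (a b : ℤ) (k : ℕ) :
    PySem.Int.bor (a * 2 ^ k) (b * 2 ^ k) = PySem.Int.bor a b * 2 ^ k := by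
  have h1 : (1 : ℕ) ≤ 2 ^ k := Nat.one_le_two_pow
  have hpz : ((2 ^ k : ℕ) : ℤ) = (2 ^ k : ℤ) := by push_cast; ring
  rw [← hpz]
  rcases (by omega : 0 ≤ a ∨ a < 0) with ha | ha
  · obtain ⟨m, rfl⟩ : ∃ m : ℕ, a = ↑m := ⟨a.toNat, by omega⟩
    rcases (by omega : 0 ≤ b ∨ b < 0) with hb | hb
    · obtain ⟨n, rfl⟩ : ∃ n : ℕ, b = ↑n := ⟨b.toNat, by omega⟩
      unfold PySem.Int.bor
      rw [if_pos (by positivity), if_pos (by positivity), if_pos (Int.natCast_nonneg m),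
        if_pos (Int.natCast_nonneg n), pv_cast_mul_pow_toNat, pv_cast_mul_pow_toNat,
        Int.toNat_natCast, Int.toNat_natCast, pv_natN1]
      push_cast; ring
    · obtain ⟨n, rfl⟩ : ∃ n : ℕ, b = -(↑n + 1) := ⟨(-b - 1).toNat, by omega⟩
      unfold PySem.Int.bor
      rw [if_pos (by positivity), if_neg (by nlinarith), if_pos (Int.natCast_nonneg m),
        if_neg (by omega), pv_neg_prod_toNat n _ h1, pv_cast_mul_pow_toNat, pv_neg_self_toNat,
        Int.toNat_natCast, pv_natN2]
      have hle : n &&& m ≤ n := Nat.and_le_left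
      have hle2 : (n &&& m) * 2 ^ k ≤ n * 2 ^ k + (2 ^ k - 1) := by
        have := Nat.mul_le_mul_right (2 ^ k) hle; omega
      push_cast [Nat.cast_sub hle2, Nat.cast_sub hle, Nat.cast_sub h1]
      ring
  · obtain ⟨m, rfl⟩ : ∃ m : ℕ, a = -(↑m + 1) := ⟨(-a - 1).toNat, by omega⟩
    rcases (by omega : 0 ≤ b ∨ b < 0) with hb | hb
    · obtain ⟨n, rfl⟩ : ∃ n : ℕ, b = ↑n := ⟨b.toNat, by omega⟩
      unfold PySem.Int.bor
      rw [if_neg (by nlinarith), if_pos (by positivity), if_neg (by omega),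
        if_pos (Int.natCast_nonneg n), pv_neg_prod_toNat m _ h1, pv_cast_mul_pow_toNat,
        pv_neg_self_toNat, Int.toNat_natCast, pv_natN2]
      have hle : m &&& n ≤ m := Nat.and_le_left
      have hle2 : (m &&& n) * 2 ^ k ≤ m * 2 ^ k + (2 ^ k - 1) := by
        have := Nat.mul_le_mul_right (2 ^ k) hle; omega
      push_cast [Nat.cast_sub hle2, Nat.cast_sub hle, Nat.cast_sub h1]
      ring
    · obtain ⟨n, rfl⟩ : ∃ n : ℕ, b = -(↑n + 1) := ⟨(-b - 1).toNat, by omega⟩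
      unfold PySem.Int.bor
      rw [if_neg (by nlinarith), if_neg (by nlinarith), if_neg (by omega), if_neg (by omega),
        pv_neg_prod_toNat m _ h1, pv_neg_prod_toNat n _ h1, pv_neg_self_toNat,
        pv_neg_self_toNat, pv_natN3]
      push_cast [Nat.cast_sub h1]
      ring

lemma pv_bor_shl (a b : ℤ) (k : ℕ) :
    (PySem.Int.bor a b) <<< k = PySem.Int.bor (a <<< k) (b <<< k) := by
  simp only [pv_shl_eq]; rw [pv_bor_mul_pow]

lemma pv_shl_shl (a : ℤ) (j k : ℕ) : (a <<< j) <<< k = a <<< (j + k) := by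
  simp only [pv_shl_eq, pow_add]; ring

-- A's loop --------------------------------------------------------------------

-- the fold factors: running A's loop from v equals v shifted past the list OR'd with the run from 0
lemma pv_foldA_factor : ∀ (xs : List Int) (v : Int),
    xs.foldl (fun v b => PySem.Int.bor (v <<< (8 : Nat)) b) v
      = PySem.Int.bor (v <<< (8 * xs.length)) (xs.foldl (fun v b => PySem.Int.bor (v <<< (8 : Nat)) b) 0)
  | [], v => by simp [pv_shl_eq, PySem.Int.bor_zero]
  | b :: t, v => by
    rw [List.foldl_cons, List.foldl_cons, pv_foldA_factor t (PySem.Int.bor (v <<< (8 : Nat)) b),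
      pv_foldA_factor t (PySem.Int.bor ((0 : Int) <<< (8 : Nat)) b)]
    have hb : PySem.Int.bor ((0 : Int) <<< (8 : Nat)) b = b := by
      rw [show ((0 : Int) <<< (8 : Nat)) = 0 by simp [pv_shl_eq], pv_zero_bor]
    rw [hb, pv_bor_shl, pv_shl_shl, pv_bor_assoc]
    congr 2
    simp [List.length_cons]; ring_nf

-- A's loop on an append splits into the two halves
lemma pv_foldA_append (xs ys : List Int) :
    (xs ++ ys).foldl (fun v b => PySem.Int.bor (v <<< (8 : Nat)) b) 0
      = PySem.Int.bor
          ((xs.foldl (fun v b => PySem.Int.bor (v <<< (8 : Nat)) b) 0) <<< (8 * ys.length))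
          (ys.foldl (fun v b => PySem.Int.bor (v <<< (8 : Nat)) b) 0) := by
  rw [List.foldl_append, pv_foldA_factor ys]

-- divide-and-conquer computes exactly A's loop value
lemma pv_unsignedB_eq_foldA (xs : List Int) :
    pvUnsignedB xs = xs.foldl (fun v b => PySem.Int.bor (v <<< (8 : Nat)) b) 0 := by
  induction xs using pvUnsignedB.induct with
  | case1 h =>
    rw [pvUnsignedB.eq_def]; simp
  | case2 b tail hle =>
    have ht : tail = [] := by
      cases tail with
      | nil => rfl
      | cons c t => simp [List.length_cons] at hle
    subst ht
    rw [pvUnsignedB.eq_def, if_pos hle]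
    simp only [List.foldl_cons, List.foldl_nil]
    rw [show ((0 : Int) <<< (8 : Nat)) = 0 by simp [pv_shl_eq], pv_zero_bor]
  | case3 xs hgt mid ih1 ih2 =>
    rw [pvUnsignedB.eq_def, if_neg hgt]
    simp only at ih1 ih2 ⊢
    rw [ih1, ih2]
    conv_rhs => rw [← List.take_append_drop mid xs]
    rw [pv_foldA_append]
    congr 2
    simp only [List.length_drop]
    rfl

-- ===== VERDICT (by name: the statement is the Claim_ definition above) =====
theorem decode_integer_spec : Claim_equal_decode_integer := by
  intro data _
  unfold Spec_decode_integer decode_integer decode_integer_alt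
  cases data with
  | nil => simp [pvUnsignedB.eq_def]
  | cons b t =>
    simp only
    rw [pv_unsignedB_eq_foldA]
    rw [show (b :: t).length * 8 = 8 * (b :: t).length by ring]
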